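-- pv_equiv track=rewrite | github.com/vatsaPatel0097/web-research-agent | agents/source_filter_agent.py | rank_documents
-- ===== SOURCE A (Python) =====
-- def rank_documents(texts: list[str], min_words: int = 200, max_docs: int = 3) -> list[str]:
--     # Basic quality ranking by length
--     scored = []
--
--     for text in texts:
--         wc = len(text.split())
--         if wc >= min_words:
--             scored.append((wc, text))
--
--     scored.sort(reverse=True, key=lambda x: x[0])
--
--     return [t for _, t in scored[:max_docs]]
-- ===== SOURCE B (Python) =====
-- def _insert_desc(top, wc, text):
--     # insert (wc, text) keeping top ordered by wc descending; equal counts go after existing ones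
--     for i in range(len(top)):
--         if top[i][0] < wc:
--             return top[:i] + [(wc, text)] + top[i:]
--     return top + [(wc, text)]
--
--
-- def rank_documents(texts: list[str], min_words: int = 200, max_docs: int = 3) -> list[str]:
--     # streaming top-k: keep a bounded buffer of the best max_docs docs; no full sort
--     top = []
--     for text in texts:
--         wc = len(text.split())
--         if wc >= min_words:
--             top = _insert_desc(top, wc, text)
--             if len(top) > max_docs:
--                 top.pop()
--     return [t for _, t in top]
-- ===== Notes on version B (the rewrite author's own statement) =====
-- stated objective: alternative
-- what changed: Replaces filter-all + full stable sort + slice with a single streaming pass that keeps a bounded buffer of the current best max_docs documents (insert in descending order, drop the overflow), so no full candidate list is built and no full sort is performed.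
-- outside the precondition, e.g. on rank_documents(['a b', 'c'], 1, -1): A returns ['a b'], B returns []
import Mathlib
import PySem

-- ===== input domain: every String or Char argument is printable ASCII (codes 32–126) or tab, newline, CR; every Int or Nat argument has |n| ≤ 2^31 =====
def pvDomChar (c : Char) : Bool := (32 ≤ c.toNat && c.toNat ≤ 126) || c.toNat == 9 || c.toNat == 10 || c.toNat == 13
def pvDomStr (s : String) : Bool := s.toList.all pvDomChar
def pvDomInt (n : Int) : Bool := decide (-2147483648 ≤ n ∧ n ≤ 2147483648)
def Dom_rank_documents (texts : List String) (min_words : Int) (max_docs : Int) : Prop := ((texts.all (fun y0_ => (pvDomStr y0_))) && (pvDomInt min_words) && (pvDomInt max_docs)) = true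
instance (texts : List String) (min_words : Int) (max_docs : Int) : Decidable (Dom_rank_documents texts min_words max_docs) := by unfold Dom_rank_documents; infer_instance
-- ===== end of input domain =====

-- B replaces filter + full stable sort + slice with a single pass keeping a bounded buffer
-- of the current best max_docs documents (streaming top-k); return values proved equal on Pre_.

-- ===== PORT A =====
def rank_documents (texts : List String) (min_words : Int) (max_docs : Int) : List String :=
  -- scored = []; for text in texts: wc = len(text.split()); if wc >= min_words: scored.append((wc, text))
  let scored : List (Int × String) :=
    texts.foldl (fun acc text =>
      let wc : Int := ((PySem.Str.split₀ text).length : Int)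
      if min_words ≤ wc then acc ++ [(wc, text)] else acc) []
  -- scored.sort(reverse=True, key=lambda x: x[0])
  let scoredSorted := PySem.List.sorted scored (fun x => x.1) true
  -- [t for _, t in scored[:max_docs]]
  (PySem.List.slice scoredSorted none (some max_docs)).map (fun p => p.2)

-- ===== PORT B =====
-- _insert_desc(top, wc, text): scan for the first entry with a smaller count, insert there
def insertDesc (top : List (Int × String)) (wc : Int) (text : String) : List (Int × String) :=
  match top with
  | [] => [(wc, text)]
  | y :: ys => if y.1 < wc then (wc, text) :: y :: ys else y :: insertDesc ys wc text

def rank_documents_alt (texts : List String) (min_words : Int) (max_docs : Int) : List String :=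
  let top : List (Int × String) :=
    texts.foldl (fun top text =>
      let wc : Int := ((PySem.Str.split₀ text).length : Int)
      if min_words ≤ wc then
        let top' := insertDesc top wc text
        if max_docs < (top'.length : Int) then top'.dropLast else top'
      else top) []
  top.map (fun p => p.2)

-- ===== PRECONDITION & SPEC =====
-- Pre_ excludes negative max_docs (outside the natural domain of document counts) when more than
-- |max_docs| documents qualify: there A's scored[:max_docs] drops the last |max_docs| candidates by
-- Python negative slicing, while B, asked for a non-positive number of documents, returns [];
-- negative max_docs with at most |max_docs| qualifying documents stays inside (both return []).
def Pre_rank_documents (texts : List String) (min_words : Int) (max_docs : Int) : Prop :=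
  0 ≤ max_docs ∨
    texts.countP (fun t => decide (min_words ≤ ((PySem.Str.split₀ t).length : Int))) ≤ (-max_docs).toNat

instance (texts : List String) (min_words : Int) (max_docs : Int) : Decidable (Pre_rank_documents texts min_words max_docs) := by unfold Pre_rank_documents; infer_instance

def pvWitness_rank_documents : List String × Int × Int := (["a b", "c d e", "f"], 1, 2)

def Spec_rank_documents (texts : List String) (min_words : Int) (max_docs : Int) (out : List String) : Prop := out = rank_documents_alt texts min_words max_docs
instance (texts : List String) (min_words : Int) (max_docs : Int) (out : List String) : Decidable (Spec_rank_documents texts min_words max_docs out) := by unfold Spec_rank_documents; infer_instance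

-- ===== CLAIM (what is proved, stated in full; the proofs are below) =====
def Claim_equal_rank_documents : Prop := ∀ (texts : List String) (min_words : Int) (max_docs : Int), Dom_rank_documents texts min_words max_docs → Pre_rank_documents texts min_words max_docs → Spec_rank_documents texts min_words max_docs (rank_documents texts min_words max_docs)

-- ===== LEMMAS AND PROOFS =====

-- truncate a buffer that exceeded k elements (Nat form of B's 'if len(top) > max_docs: top.pop()')
def pvTrunc (k : Nat) (l : List (Int × String)) : List (Int × String) :=
  if k < l.length then l.dropLast else l

theorem insertDesc_eq (top : List (Int × String)) (wc : Int) (text : String) :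
    insertDesc top wc text
      = PySem.List.insertBy (fun a b : Int × String => decide (b.1 < a.1)) (wc, text) top := by
  induction top with
  | nil => rfl
  | cons y ys ih =>
    simp only [insertDesc, PySem.List.insertBy, ih, decide_eq_true_eq]

theorem length_insertBy (bf : (Int × String) → (Int × String) → Bool)
    (x : Int × String) (l : List (Int × String)) :
    (PySem.List.insertBy bf x l).length = l.length + 1 := by
  induction l with
  | nil => rfl
  | cons y ys ih =>
    simp only [PySem.List.insertBy]
    split <;> simp [ih]

theorem insertBy_ne_nil (bf : (Int × String) → (Int × String) → Bool)
    (x : Int × String) (l : List (Int × String)) :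
    PySem.List.insertBy bf x l ≠ [] := by
  have := length_insertBy bf x l
  intro h
  rw [h] at this
  simp at this

-- key lemma: take k of an insertion equals insert-into-the-truncated-buffer, then truncate
theorem take_insertBy (bf : (Int × String) → (Int × String) → Bool)
    (s : List (Int × String)) : ∀ (k : Nat) (x : Int × String),
    (PySem.List.insertBy bf x s).take k = pvTrunc k (PySem.List.insertBy bf x (s.take k)) := by
  induction s with
  | nil =>
    intro k x
    cases k with
    | zero => simp [PySem.List.insertBy, pvTrunc]
    | succ j => simp [PySem.List.insertBy, pvTrunc]
  | cons y t ih =>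
    intro k x
    cases k with
    | zero => simp [PySem.List.insertBy, pvTrunc]
    | succ j =>
      simp only [List.take_succ_cons, PySem.List.insertBy]
      by_cases hb : bf x y = true
      · simp only [hb, if_true]
        by_cases hl : j ≤ t.length
        · have : pvTrunc (j+1) (x :: y :: t.take j) = (x :: y :: t.take j).dropLast := by
            simp [pvTrunc, List.length_take]; omega
          rw [this]
          cases j with
          | zero => simp
          | succ i =>
            have hne : t.take (i+1) ≠ [] := by
              have : (t.take (i+1)).length = i+1 := by simp [List.length_take]; omega
              intro h; rw [h] at this; simp at this
            have h1 : (List.take (i+1) t).length = i+1 := by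
              simp [List.length_take]; omega
            have h2 : (List.take (i+1) t).dropLast = List.take i t := by
              rw [List.dropLast_eq_take, h1, List.take_take]
              congr 1
              omega
            simp [List.dropLast_cons_of_ne_nil, hne, h2]
        · have : t.take j = t := List.take_of_length_le (by omega)
          rw [this]
          have : pvTrunc (j+1) (x :: y :: t) = x :: y :: t := by
            simp [pvTrunc]; omega
          rw [this, List.take_of_length_le]
          simp; omega
      · simp only [Bool.not_eq_true] at hb
        simp only [hb, Bool.false_eq_true, if_false]
        rw [List.take_succ_cons, ih j x]
        have hL := length_insertBy bf x (t.take j)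
        have hne := insertBy_ne_nil bf x (t.take j)
        simp only [pvTrunc, List.length_cons]
        by_cases hc : j < (PySem.List.insertBy bf x (t.take j)).length
        · simp only [hc, if_true]
          have : j + 1 < (PySem.List.insertBy bf x (t.take j)).length + 1 := by omega
          simp [this, List.dropLast_cons_of_ne_nil hne]
        · simp only [hc, if_false]
          have : ¬ (j + 1 < (PySem.List.insertBy bf x (t.take j)).length + 1) := by omega
          simp [this]

-- folding insert-then-truncate computes take k of the insertion sort
theorem foldl_take (bf : (Int × String) → (Int × String) → Bool)
    (l : List (Int × String)) : ∀ (acc : List (Int × String)) (k : Nat),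
    (l.foldl (fun a x => PySem.List.insertBy bf x a) acc).take k
      = l.foldl (fun a x => pvTrunc k (PySem.List.insertBy bf x a)) (acc.take k) := by
  induction l with
  | nil => intro acc k; rfl
  | cons x t ih =>
    intro acc k
    simp only [List.foldl_cons]
    rw [ih, take_insertBy]

-- B's Int-valued truncation test is pvTrunc for nonnegative max_docs
theorem truncInt_eq (max_docs : Int) (h : 0 ≤ max_docs) (l : List (Int × String)) :
    (if max_docs < (l.length : Int) then l.dropLast else l) = pvTrunc max_docs.toNat l := by
  unfold pvTrunc
  split_ifs with h1 h2 <;> first | rfl | omega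

-- B's single pass over texts equals insert-then-truncate folded over the filtered candidates
theorem foldl_b_eq (min_words max_docs : Int) (h : 0 ≤ max_docs) (texts : List String) :
    ∀ acc : List (Int × String),
    texts.foldl (fun top text =>
        if min_words ≤ ((PySem.Str.split₀ text).length : Int) then
          (if max_docs < ((insertDesc top ((PySem.Str.split₀ text).length : Int) text).length : Int)
            then (insertDesc top ((PySem.Str.split₀ text).length : Int) text).dropLast
            else insertDesc top ((PySem.Str.split₀ text).length : Int) text)
        else top) acc
    = ((texts.filter (fun t => decide (min_words ≤ ((PySem.Str.split₀ t).length : Int)))).map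
        (fun t => (((PySem.Str.split₀ t).length : Int), t))).foldl
        (fun a x => pvTrunc max_docs.toNat
          (PySem.List.insertBy (fun a b : Int × String => decide (b.1 < a.1)) x a)) acc := by
  induction texts with
  | nil => intro acc; rfl
  | cons t ts ih =>
    intro acc
    by_cases hp : min_words ≤ ((PySem.Str.split₀ t).length : Int)
    · simp only [List.foldl_cons, List.filter_cons, hp, decide_true, if_true, List.map_cons]
      rw [ih]
      congr 1
      rw [insertDesc_eq]
      exact truncInt_eq _ h _
    · simp only [List.foldl_cons, List.filter_cons, hp, decide_false, Bool.false_eq_true, if_false]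
      exact ih acc

-- A's candidate-collecting loop in the Bool-predicate shape of foldl_append_if
theorem astep_eq (min_words : Int) :
    (fun (acc : List (Int × String)) (text : String) =>
        if min_words ≤ ((PySem.Str.split₀ text).length : Int)
          then acc ++ [(((PySem.Str.split₀ text).length : Int), text)] else acc)
    = (fun acc text =>
        if (fun t => decide (min_words ≤ ((PySem.Str.split₀ t).length : Int))) text = true
          then acc ++ [(fun t => (((PySem.Str.split₀ t).length : Int), t)) text] else acc) := by
  funext acc text
  simp

-- with a negative max_docs B's buffer is emptied after every insertion, so the pass returns []
theorem foldl_b_nil (min_words max_docs : Int) (hmd : max_docs < 0) (texts : List String) :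
    texts.foldl (fun top text =>
        if min_words ≤ ((PySem.Str.split₀ text).length : Int) then
          (if max_docs < ((insertDesc top ((PySem.Str.split₀ text).length : Int) text).length : Int)
            then (insertDesc top ((PySem.Str.split₀ text).length : Int) text).dropLast
            else insertDesc top ((PySem.Str.split₀ text).length : Int) text)
        else top) ([] : List (Int × String)) = [] := by
  induction texts with
  | nil => rfl
  | cons t ts ih =>
    simp only [List.foldl_cons]
    have hstep : (if min_words ≤ ((PySem.Str.split₀ t).length : Int) then
          (if max_docs < ((insertDesc ([] : List (Int × String)) ((PySem.Str.split₀ t).length : Int) t).length : Int)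
            then (insertDesc ([] : List (Int × String)) ((PySem.Str.split₀ t).length : Int) t).dropLast
            else insertDesc ([] : List (Int × String)) ((PySem.Str.split₀ t).length : Int) t)
        else ([] : List (Int × String))) = [] := by
      by_cases hp : min_words ≤ ((PySem.Str.split₀ t).length : Int)
      · have hlt : max_docs <
            ((insertDesc ([] : List (Int × String)) ((PySem.Str.split₀ t).length : Int) t).length : Int) := by
          simp [insertDesc]; omega
        rw [if_pos hp, if_pos hlt]
        simp [insertDesc]
      · simp [hp]
    rw [hstep]
    exact ih

-- ===== VERDICT (by name: the statement is the Claim_ definition above) =====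
theorem rank_documents_spec : Claim_equal_rank_documents := by
  intro texts min_words max_docs _hdom hpre
  unfold Pre_rank_documents at hpre
  unfold Spec_rank_documents
  show (PySem.List.slice
      (PySem.List.sorted
        (texts.foldl (fun (acc : List (Int × String)) (text : String) =>
          if min_words ≤ ((PySem.Str.split₀ text).length : Int)
            then acc ++ [(((PySem.Str.split₀ text).length : Int), text)] else acc) [])
        (fun x => x.1) true)
      none (some max_docs)).map (fun p => p.2)
    = (texts.foldl (fun top text =>
        if min_words ≤ ((PySem.Str.split₀ text).length : Int) then
          (if max_docs < ((insertDesc top ((PySem.Str.split₀ text).length : Int) text).length : Int)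
            then (insertDesc top ((PySem.Str.split₀ text).length : Int) text).dropLast
            else insertDesc top ((PySem.Str.split₀ text).length : Int) text)
        else top) []).map (fun p => p.2)
  by_cases h0 : 0 ≤ max_docs
  · rw [foldl_b_eq min_words max_docs h0 texts]
    rw [astep_eq min_words, PySem.List.foldl_append_if, List.nil_append,
        PySem.List.sorted_rev_eq_foldl_insertBy, PySem.List.slice_to _ h0]
    congr 1
    rw [foldl_take]
    simp
  · have h0 : max_docs < 0 := by omega
    have hcnt : texts.countP (fun t => decide (min_words ≤ ((PySem.Str.split₀ t).length : Int)))
        ≤ (-max_docs).toNat := by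
      rcases hpre with h | h
      · omega
      · exact h
    rw [foldl_b_nil min_words max_docs h0 texts]
    rw [astep_eq min_words, PySem.List.foldl_append_if, List.nil_append]
    have hmd : max_docs = -(((-max_docs).toNat : Nat) : Int) := by omega
    rw [hmd, PySem.List.slice_to_neg_natCast _ _ (by omega)]
    have hlen : (PySem.List.sorted
        ((texts.filter (fun t => decide (min_words ≤ ((PySem.Str.split₀ t).length : Int)))).map
          (fun t => (((PySem.Str.split₀ t).length : Int), t)))
        (fun x => x.1) true).length ≤ (-max_docs).toNat := by
      rw [PySem.List.length_sorted, List.length_map, ← List.countP_eq_length_filter]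
      exact hcnt
    rw [Nat.sub_eq_zero_of_le hlen]
    simp
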